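-- pv_equiv track=rewrite | github.com/iamvickynguyen/Kattis-Solutions | smartphone.py | count
-- ===== SOURCE A (Python) =====
-- from collections import deque
--
-- def count(word, suggestion):
--     w = deque()
--     s = deque()
--     for i in word:
--         w.append(i)
--     for j in suggestion:
--         s.append(j)
--     while w and s and w[0] == s[0]:
--         w.popleft()
--         s.popleft()
--     return len(w) + len(s)
-- ===== SOURCE B (Python) =====
-- def count(word, suggestion):
--     k = 0
--     for a, b in zip(word, suggestion):
--         if a != b:
--             break
--         k += 1
--     return len(word) + len(suggestion) - 2 * k
-- ===== Notes on version B (the rewrite author's own statement) =====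
-- stated objective: simpler
-- what changed: Replaces the two deques popped in lockstep by a single common-prefix counter over zip plus the closed-form return len(word)+len(suggestion)-2*k; no queues are built, which also removes the per-character deque overhead.
import Mathlib
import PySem

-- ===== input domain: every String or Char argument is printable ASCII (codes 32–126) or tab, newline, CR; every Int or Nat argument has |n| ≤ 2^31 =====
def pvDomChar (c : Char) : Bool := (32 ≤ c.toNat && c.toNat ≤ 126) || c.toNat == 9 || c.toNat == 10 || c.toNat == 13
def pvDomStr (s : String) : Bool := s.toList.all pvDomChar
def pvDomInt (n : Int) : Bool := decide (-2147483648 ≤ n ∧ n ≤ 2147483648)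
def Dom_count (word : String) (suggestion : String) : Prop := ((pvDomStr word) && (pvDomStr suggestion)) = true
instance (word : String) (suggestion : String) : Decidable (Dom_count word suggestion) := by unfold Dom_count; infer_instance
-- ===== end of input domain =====

-- B replaces A's two deques popped in lockstep by a common-prefix counter and a closed-form return (simpler).

-- ===== PORT A =====
-- the while loop: pop both fronts while both non-empty and fronts equal; then len(w)+len(s)
def countLoop : List Char → List Char → Int
  | a :: as, b :: bs =>
      if a = b then countLoop as bs
      else ((a :: as).length : Int) + ((b :: bs).length : Int)
  | as, bs => (as.length : Int) + (bs.length : Int)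

def count (word : String) (suggestion : String) : Int :=
  countLoop word.toList suggestion.toList

-- ===== PORT B =====
-- prefix counter over zip, then arithmetic
def prefCount : List Char → List Char → Nat
  | a :: as, b :: bs => if a ≠ b then 0 else prefCount as bs + 1
  | _, _ => 0

def count_alt (word : String) (suggestion : String) : Int :=
  (word.toList.length : Int) + (suggestion.toList.length : Int)
    - 2 * (prefCount word.toList suggestion.toList : Int)

-- ===== PRECONDITION & SPEC =====
def Spec_count (word : String) (suggestion : String) (out : Int) : Prop := out = count_alt word suggestion
instance (word : String) (suggestion : String) (out : Int) : Decidable (Spec_count word suggestion out) := by unfold Spec_count; infer_instance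

-- ===== CLAIM (what is proved, stated in full; the proofs are below) =====
def Claim_equal_count : Prop := ∀ (word : String) (suggestion : String), Dom_count word suggestion → Spec_count word suggestion (count word suggestion)

-- ===== LEMMAS AND PROOFS =====
theorem countLoop_eq (as bs : List Char) :
    countLoop as bs = (as.length : Int) + (bs.length : Int) - 2 * (prefCount as bs : Int) := by
  induction as generalizing bs with
  | nil => cases bs <;> simp [countLoop, prefCount]
  | cons a as ih =>
    cases bs with
    | nil => simp [countLoop, prefCount]
    | cons b bs =>
      by_cases h : a = b
      · subst h
        simp only [countLoop, prefCount, if_pos rfl, ne_eq, not_true_eq_false,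
          if_false, List.length_cons, ih]
        push_cast
        ring
      · simp [countLoop, prefCount, h]

-- ===== VERDICT (by name: the statement is the Claim_ definition above) =====
theorem count_spec : Claim_equal_count := by
  intro word suggestion _
  unfold Spec_count count count_alt
  exact countLoop_eq _ _
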